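-- pv_equiv track=rewrite | github.com/elymatos/pytorch | htpc/htpc15_train_more_levels.py | build_phrase_memory
-- ===== SOURCE A (Python) =====
-- from collections import defaultdict
--
-- def build_phrase_memory(sequences, chunk_size=3, blacklist=None):
--     phrase_counts = defaultdict(int)
--     for seq in sequences:
--         if len(seq) >= chunk_size:
--             for i in range(len(seq) - chunk_size + 1):
--                 bigrams = [(seq[j], seq[j + 1]) for j in range(i, i + chunk_size - 1)]
--                 if blacklist and any(bg in blacklist for bg in bigrams):
--                     continue
--                 phrase_counts[tuple(bigrams)] += 1
--     return dict(phrase_counts)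
-- ===== SOURCE B (Python) =====
-- from collections import Counter
--
-- def build_phrase_memory(sequences, chunk_size=3, blacklist=None):
--     m = chunk_size - 1          # bigrams per phrase window (no bigrams when chunk_size <= 1)
--     bl = set(blacklist) if blacklist else None
--     counts = Counter()
--     for seq in sequences:
--         if len(seq) < chunk_size:
--             continue
--         bg = list(zip(seq, seq[1:]))
--         # prefix counts of blacklisted bigrams: pref[k] = #{p < k : bg[p] in bl}
--         pref = [0]
--         t = 0
--         for b in bg:
--             t += 1 if (bl is not None and b in bl) else 0
--             pref.append(t)
--         for i in range(len(seq) - chunk_size + 1):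
--             if bl is not None and m > 0 and pref[i + m] - pref[i] > 0:
--                 continue
--             counts[tuple(bg[i:i + max(m, 0)])] += 1
--     return dict(counts)
-- ===== Notes on version B (the rewrite author's own statement) =====
-- stated objective: alternative
-- what changed: B precomputes each sequence's bigram table once and a prefix-sum array of blacklisted-bigram counts, so each window is a slice of the table and the blacklist test is an O(1) prefix-sum difference instead of rebuilding the bigram list and scanning it against the blacklist per window.
import Mathlib
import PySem

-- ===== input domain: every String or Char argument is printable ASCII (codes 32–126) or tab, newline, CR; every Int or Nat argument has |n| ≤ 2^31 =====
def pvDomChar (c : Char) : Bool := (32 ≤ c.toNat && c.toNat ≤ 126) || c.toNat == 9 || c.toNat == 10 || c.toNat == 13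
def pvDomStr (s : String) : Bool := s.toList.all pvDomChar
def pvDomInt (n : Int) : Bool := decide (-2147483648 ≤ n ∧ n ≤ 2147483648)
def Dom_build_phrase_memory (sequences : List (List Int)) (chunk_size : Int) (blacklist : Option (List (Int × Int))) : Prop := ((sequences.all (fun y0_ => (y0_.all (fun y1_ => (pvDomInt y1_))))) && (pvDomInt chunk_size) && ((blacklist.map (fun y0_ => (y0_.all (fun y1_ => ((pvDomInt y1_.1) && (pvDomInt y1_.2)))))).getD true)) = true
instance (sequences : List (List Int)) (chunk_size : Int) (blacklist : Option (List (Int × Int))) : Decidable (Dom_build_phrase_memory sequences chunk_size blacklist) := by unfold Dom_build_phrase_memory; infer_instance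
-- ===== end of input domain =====

-- B replaces A's per-window bigram rebuild and blacklist scan by one bigram table plus a
-- prefix-sum of blacklisted positions per sequence (objective: alternative decomposition).

-- ===== PORT A =====
-- one iteration of A's 'for seq in sequences' body
def bpmA_step (cs : Int) (blacklist : Option (List (Int × Int)))
    (d : PySem.Dict (List (Int × Int)) Int) (seq : List Int) : PySem.Dict (List (Int × Int)) Int :=
  if (seq.length : Int) ≥ cs then
    (PySem.List.pyRange 0 ((seq.length : Int) - cs + 1) 1).foldl (fun d i =>
      -- bigrams = [(seq[j], seq[j+1]) for j in range(i, i + chunk_size - 1)]; indices are in range on every loop iteration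
      let bigrams := (PySem.List.pyRange i (i + cs - 1) 1).map
        (fun j => (PySem.List.pyGetD seq j 0, PySem.List.pyGetD seq (j + 1) 0))
      -- if blacklist and any(bg in blacklist for bg in bigrams): continue
      if (match blacklist with
          | none => false
          | some bl => decide (bl ≠ []) && bigrams.any (fun b => bl.contains b)) then d
      else d.insert bigrams (d.getD bigrams 0 + 1)) d
  else d

def build_phrase_memory (sequences : List (List Int)) (chunk_size : Int) (blacklist : Option (List (Int × Int))) : List (List (Int × Int) × Int) :=
  (sequences.foldl (bpmA_step chunk_size blacklist) PySem.Dict.empty).items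

-- ===== PORT B =====
-- bl = set(blacklist) if blacklist else None
def bpmB_blSet (blacklist : Option (List (Int × Int))) : Option (PySem.Set (Int × Int)) :=
  match blacklist with
  | none => none
  | some l => if l.isEmpty then none else some (PySem.Set.ofList l)

-- pref = [0]; t = 0; for b in bg: t += 1 if (bl is not None and b in bl) else 0; pref.append(t)
def bpmB_pref (bl? : Option (PySem.Set (Int × Int))) (bg : List (Int × Int)) : List Int :=
  (bg.foldl (fun (s : List Int × Int) b =>
      let t := s.2 + (if bl?.elim false (fun bl => PySem.Set.contains bl b) then 1 else 0)
      (s.1 ++ [t], t)) ([0], 0)).1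

-- one iteration of B's 'for seq in sequences' body
def bpmB_step (cs : Int) (bl? : Option (PySem.Set (Int × Int)))
    (d : PySem.Dict (List (Int × Int)) Int) (seq : List Int) : PySem.Dict (List (Int × Int)) Int :=
  if (seq.length : Int) < cs then d
  else
    let bg := seq.zip (PySem.List.slice seq (some 1) none)   -- zip(seq, seq[1:])
    let pref := bpmB_pref bl? bg
    (PySem.List.pyRange 0 ((seq.length : Int) - cs + 1) 1).foldl (fun d i =>
      -- if bl is not None and m > 0 and pref[i + m] - pref[i] > 0: continue  (m = cs - 1)
      if bl?.isSome && decide (0 < cs - 1) &&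
          decide (PySem.List.pyGetD pref (i + (cs - 1)) 0 - PySem.List.pyGetD pref i 0 > 0) then d
      else
        -- counts[tuple(bg[i:i + max(m, 0)])] += 1
        let window := PySem.List.slice bg (some i) (some (i + max (cs - 1) 0))
        d.modify window 0 (· + 1)) d

def build_phrase_memory_alt (sequences : List (List Int)) (chunk_size : Int) (blacklist : Option (List (Int × Int))) : List (List (Int × Int) × Int) :=
  (sequences.foldl (bpmB_step chunk_size (bpmB_blSet blacklist)) PySem.Dict.empty).items

-- ===== PRECONDITION & SPEC =====
def Spec_build_phrase_memory (sequences : List (List Int)) (chunk_size : Int) (blacklist : Option (List (Int × Int))) (out : List (List (Int × Int) × Int)) : Prop := out = build_phrase_memory_alt sequences chunk_size blacklist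
instance (sequences : List (List Int)) (chunk_size : Int) (blacklist : Option (List (Int × Int))) (out : List (List (Int × Int) × Int)) : Decidable (Spec_build_phrase_memory sequences chunk_size blacklist out) := by unfold Spec_build_phrase_memory; infer_instance

-- ===== CLAIM (what is proved, stated in full; the proofs are below) =====
def Claim_equal_build_phrase_memory : Prop := ∀ (sequences : List (List Int)) (chunk_size : Int) (blacklist : Option (List (Int × Int))), Dom_build_phrase_memory sequences chunk_size blacklist → Spec_build_phrase_memory sequences chunk_size blacklist (build_phrase_memory sequences chunk_size blacklist)

-- ===== LEMMAS AND PROOFS =====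

-- shape of a unit-step range starting at a Nat
theorem bpm_pyRange_add (n K : Nat) :
    PySem.List.pyRange (n : Int) ((n : Int) + (K : Int)) 1 = (List.range K).map (fun k => ((n + k : Nat) : Int)) := by
  induction K with
  | zero => simp [PySem.List.pyRange_one_eq_nil]
  | succ K ih =>
    rw [show ((n : Int) + ((K + 1 : Nat) : Int)) = ((n : Int) + (K : Int)) + 1 by push_cast; ring,
        PySem.List.pyRange_one_succ_right (by omega), ih, List.range_succ]
    simp

-- A's per-window bigram list IS the corresponding slice of B's bigram table
theorem bpm_bigrams_eq_slice (seq : List Int) (n K : Nat) (hnK : n + K + 1 ≤ seq.length) :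
    (PySem.List.pyRange (n : Int) ((n : Int) + (K : Int)) 1).map
        (fun j => (PySem.List.pyGetD seq j 0, PySem.List.pyGetD seq (j + 1) 0))
      = ((seq.zip seq.tail).drop n).take K := by
  rw [bpm_pyRange_add, List.map_map]
  apply List.ext_getElem
  · simp [List.length_zip, List.length_tail]; omega
  · intro k h1 h2
    simp only [List.getElem_map, List.getElem_range, Function.comp_apply,
      List.getElem_take, List.getElem_drop, List.getElem_zip]
    have hk : k < K := by simpa using h1
    rw [show ((n + k : Nat) : Int) + 1 = ((n + k + 1 : Nat) : Int) by push_cast; ring]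
    rw [PySem.List.pyGetD_natCast, PySem.List.pyGetD_natCast]
    rw [List.getD_eq_getElem seq 0 (by omega), List.getD_eq_getElem seq 0 (by omega)]
    simp [List.getElem_tail]

-- the prefix fold, generalized over the accumulator
theorem bpm_pref_fold (cond : (Int × Int) → Bool) (bg : List (Int × Int)) :
    ∀ (p : List Int) (t : Int),
      (bg.foldl (fun (s : List Int × Int) b =>
          let t := s.2 + (if cond b then 1 else 0)
          (s.1 ++ [t], t)) (p, t)).1
        = p ++ (List.range bg.length).map (fun k => t + ((bg.take (k + 1)).countP cond : Int)) := by
  induction bg with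
  | nil => intro p t; simp
  | cons b bg ih =>
    intro p t
    simp only [List.foldl_cons, ih, List.length_cons, List.range_succ_eq_map, List.map_cons,
      List.map_map, List.take_succ_cons, List.countP_cons]
    by_cases hb : cond b <;>
      simp only [hb, if_true, List.append_assoc, List.singleton_append, Function.comp_def] <;>
      · congr 2
        refine List.map_congr_left fun k _ => ?_
        simp only [Nat.succ_eq_add_one, Bool.false_eq_true, if_false]
        push_cast
        ring

-- pref[j] counts the blacklisted bigrams among the first j entries of the table
theorem bpm_pref_getD (bl? : Option (PySem.Set (Int × Int))) (bg : List (Int × Int)) (j : Nat)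
    (hj : j ≤ bg.length) :
    PySem.List.pyGetD (bpmB_pref bl? bg) ((j : Nat) : Int) 0
      = (((bg.take j).countP (fun b => bl?.elim false (fun bl => PySem.Set.contains bl b))) : Int) := by
  unfold bpmB_pref
  rw [bpm_pref_fold, PySem.List.pyGetD_natCast]
  cases j with
  | zero => simp
  | succ j =>
    rw [List.singleton_append, List.getD_cons_succ,
        List.getD_eq_getElem _ 0 (by simpa using by omega)]
    simp

-- the two per-sequence bodies agree on every sequence and accumulator
theorem bpm_step_eq (cs : Int) (blacklist : Option (List (Int × Int)))
    (d : PySem.Dict (List (Int × Int)) Int) (seq : List Int) :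
    bpmA_step cs blacklist d seq = bpmB_step cs (bpmB_blSet blacklist) d seq := by
  unfold bpmA_step bpmB_step
  by_cases hlen : (seq.length : Int) < cs
  · simp [hlen, not_le.mpr hlen]
  · have hge : (seq.length : Int) ≥ cs := not_lt.mp hlen
    simp only [hge, if_true, hlen, if_false]
    rw [PySem.List.slice_from_one]
    apply PySem.List.foldl_congr_mem
    intro acc i hi
    obtain ⟨h0, h1⟩ := PySem.List.mem_pyRange_one.mp hi
    set n := i.toNat with hn
    set K := (max (cs - 1) 0).toNat with hK
    have hi' : i = (n : Int) := (Int.toNat_of_nonneg h0).symm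
    have hKi : max (cs - 1) 0 = (K : Int) := by omega
    have hnK : n + K + 1 ≤ seq.length ∨ K = 0 := by omega
    have hbg : (seq.zip seq.tail).length = seq.length - 1 := by
      simp [List.length_zip, List.length_tail]
    -- rewrite A's bigrams and B's window to the same drop/take
    have hA : (PySem.List.pyRange i (i + cs - 1) 1).map
        (fun j => (PySem.List.pyGetD seq j 0, PySem.List.pyGetD seq (j + 1) 0))
        = ((seq.zip seq.tail).drop n).take K := by
      by_cases hcs : 1 ≤ cs
      · rw [show i + cs - 1 = (n : Int) + (K : Int) by omega, hi',
            bpm_bigrams_eq_slice seq n K (by omega)]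
      · rw [PySem.List.pyRange_one_eq_nil (by omega), List.map_nil,
            show K = 0 by omega, List.take_zero]

    have hB : PySem.List.slice (seq.zip seq.tail) (some i) (some (i + max (cs - 1) 0))
        = ((seq.zip seq.tail).drop n).take K := by
      rw [hi', hKi, PySem.List.slice_natCast_add]
    simp only [hA, hB]
    -- condition equivalence, by cases on the blacklist
    have hcond : (match blacklist with
          | none => false
          | some bl => decide (bl ≠ []) &&
              (((seq.zip seq.tail).drop n).take K).any (fun b => bl.contains b))
        = ((bpmB_blSet blacklist).isSome && decide (0 < cs - 1) &&
            decide (PySem.List.pyGetD (bpmB_pref (bpmB_blSet blacklist) (seq.zip seq.tail)) (i + (cs - 1)) 0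
              - PySem.List.pyGetD (bpmB_pref (bpmB_blSet blacklist) (seq.zip seq.tail)) i 0 > 0)) := by
      cases blacklist with
      | none => simp [bpmB_blSet]
      | some bl =>
        by_cases hbl : bl = []
        · simp [bpmB_blSet, hbl]
        · have hne : bl.isEmpty = false := by simpa [List.isEmpty_iff] using hbl
          simp only [bpmB_blSet, hne, Bool.false_eq_true, if_false, Option.isSome_some, Bool.true_and,
            hbl, ne_eq, not_false_iff, decide_true]
          by_cases hK0 : K = 0
          · simp only [hK0, List.take_zero, List.any_nil]
            simp
            intro h
            omega
          · have hcs1 : (0 < cs - 1) := by omega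
            rcases hnK with hnK | hnK; swap
            · omega
            simp only [hcs1, decide_true, Bool.true_and]
            rw [show i + (cs - 1) = ((n + K : Nat) : Int) by omega, hi',
                bpm_pref_getD _ _ _ (by omega), bpm_pref_getD _ _ _ (by omega)]
            rw [Bool.eq_iff_iff]
            simp only [decide_eq_true_eq]
            rw [List.take_add, List.countP_append]
            have hmem : ∀ b : Int × Int, PySem.Set.contains (PySem.Set.ofList bl) b = bl.contains b := by
              intro b; rw [Bool.eq_iff_iff]; simp [PySem.Set.contains, PySem.Set.mem_ofList]
            constructor
            · intro hany
              obtain ⟨a, ha, hpa⟩ := List.any_eq_true.mp hany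
              have hpos : 0 < (((seq.zip seq.tail).drop n).take K).countP
                  (fun b => (Option.elim (some (PySem.Set.ofList bl)) false fun bl => PySem.Set.contains bl b)) := by
                apply List.countP_pos_iff.mpr
                exact ⟨a, ha, by simpa [hmem a] using hpa⟩
              omega
            · intro hgt
              have hpos : 0 < (((seq.zip seq.tail).drop n).take K).countP
                  (fun b => (Option.elim (some (PySem.Set.ofList bl)) false fun bl => PySem.Set.contains bl b)) := by omega
              obtain ⟨a, ha, hpa⟩ := List.countP_pos_iff.mp hpos
              exact List.any_eq_true.mpr ⟨a, ha, by simpa [hmem a] using hpa⟩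
    have key : ∀ (C C' : Bool) (w : List (Int × Int)), C = C' →
        (if C then acc else acc.insert w (acc.getD w 0 + 1))
          = (if C' then acc else acc.modify w 0 (· + 1)) := by
      intro C C' w h
      subst h
      by_cases hC : C = true
      · simp [hC]
      · simp only [Bool.not_eq_true] at hC
        simp only [hC, Bool.false_eq_true, if_false]
        rfl
    exact key _ _ _ hcond

-- ===== VERDICT (by name: the statement is the Claim_ definition above) =====
theorem build_phrase_memory_spec : Claim_equal_build_phrase_memory := by
  intro sequences chunk_size blacklist _
  unfold Spec_build_phrase_memory build_phrase_memory build_phrase_memory_alt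
  congr 1
  apply PySem.List.foldl_congr_mem
  intro acc seq _
  exact bpm_step_eq chunk_size blacklist acc seq
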